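-- pv_equiv track=rewrite | github.com/nikspatel007/rl-emails | src/parse_gmail_mbox.py | parse_gmail_labels
-- ===== SOURCE A (Python) =====
-- def parse_gmail_labels(labels_header: str) -> list[str]:
--     """Parse X-Gmail-Labels header into list of labels.
--
--     Gmail labels can be comma-separated and may be quoted if they contain
--     special characters.
--
--     Args:
--         labels_header: Value of X-Gmail-Labels header
--
--     Returns:
--         List of label strings
--     """
--     if not labels_header:
--         return []
--
--     labels = []
--     # Handle quoted labels and comma separation
--     current = ""
--     in_quotes = False
--
--     for char in labels_header:
--         if char == '"':
--             in_quotes = not in_quotes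
--         elif char == ',' and not in_quotes:
--             label = current.strip().strip('"')
--             if label:
--                 labels.append(label)
--             current = ""
--         else:
--             current += char
--
--     # Don't forget the last label
--     label = current.strip().strip('"')
--     if label:
--         labels.append(label)
--
--     return labels
-- ===== SOURCE B (Python) =====
-- def parse_gmail_labels(labels_header: str) -> list[str]:
--     """Parse X-Gmail-Labels header into list of labels.
--
--     Segment-based reimplementation: split on '"' so segments alternate
--     between outside-quotes and inside-quotes, then split only the outside
--     segments on commas, carrying a running buffer across segments.
--     """
--     if not labels_header:
--         return []
--
--     labels = []
--     current = ""
--     inside = False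
--     for seg in labels_header.split('"'):
--         if inside:
--             current += seg
--         else:
--             pieces = seg.split(',')
--             current += pieces[0]
--             for piece in pieces[1:]:
--                 label = current.strip().strip('"')
--                 if label:
--                     labels.append(label)
--                 current = piece
--         inside = not inside
--
--     label = current.strip().strip('"')
--     if label:
--         labels.append(label)
--
--     return labels
-- ===== Notes on version B (the rewrite author's own statement) =====
-- stated objective: alternative
-- what changed: Replaced the per-character state machine (an in_quotes flag toggled character by character) by a segment-based pass: split the header on the quote character into alternating outside/inside segments, split only outside segments on commas, and carry a running buffer across segment boundaries.
import Mathlib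
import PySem

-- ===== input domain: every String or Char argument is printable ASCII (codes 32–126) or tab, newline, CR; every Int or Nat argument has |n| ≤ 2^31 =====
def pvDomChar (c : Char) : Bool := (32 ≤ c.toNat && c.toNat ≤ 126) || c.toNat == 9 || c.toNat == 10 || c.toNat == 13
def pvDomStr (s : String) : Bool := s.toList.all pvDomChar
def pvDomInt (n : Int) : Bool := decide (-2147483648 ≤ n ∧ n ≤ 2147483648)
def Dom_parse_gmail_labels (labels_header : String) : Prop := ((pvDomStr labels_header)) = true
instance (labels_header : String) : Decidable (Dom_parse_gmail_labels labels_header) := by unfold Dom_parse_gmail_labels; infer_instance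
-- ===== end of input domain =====

-- B replaces A's per-character quote state machine by a pass over the segments
-- obtained from splitting on '"' (alternative decomposition, same cost).

-- ===== PORT A =====
-- label = current.strip().strip('"'); if label: labels.append(label)
def pvFlushA (labels : List String) (current : List Char) : List String :=
  let label := PySem.Chars.stripChars (PySem.Chars.strip current) ['"']
  if label = [] then labels else labels ++ [String.ofList label]

-- one iteration of A's for-char loop; state = (labels, current, in_quotes)
def pvStepA (st : List String × List Char × Bool) (c : Char) : List String × List Char × Bool :=
  if c = '"' then (st.1, st.2.1, !st.2.2)
  else if c = ',' ∧ st.2.2 = false then (pvFlushA st.1 st.2.1, [], st.2.2)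
  else (st.1, st.2.1 ++ [c], st.2.2)

def parse_gmail_labels (labels_header : String) : List String :=
  if labels_header.toList = [] then []
  else
    let st := labels_header.toList.foldl pvStepA ([], [], false)
    pvFlushA st.1 st.2.1

-- ===== PORT B =====
-- same flush: label = current.strip().strip('"'); if label: labels.append(label)
def pvFlushB (labels : List String) (current : List Char) : List String :=
  let label := PySem.Chars.stripChars (PySem.Chars.strip current) ['"']
  if label = [] then labels else labels ++ [String.ofList label]

-- outside-quotes segment: split on commas, extend buffer with the first piece,
-- flush before each later piece; state = (labels, current)
def pvOutsideB (st : List String × List Char) (seg : List Char) : List String × List Char :=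
  match PySem.Chars.splitOn seg [','] with
  | [] => st
  | p :: rest => rest.foldl (fun st piece => (pvFlushB st.1 st.2, piece)) (st.1, st.2 ++ p)

-- one iteration of B's for-seg loop; state = ((labels, current), inside)
def pvStepB (st : (List String × List Char) × Bool) (seg : List Char) : (List String × List Char) × Bool :=
  ((if st.2 then (st.1.1, st.1.2 ++ seg) else pvOutsideB st.1 seg), !st.2)

def parse_gmail_labels_alt (labels_header : String) : List String :=
  if labels_header.toList = [] then []
  else
    let st := (PySem.Chars.splitOn labels_header.toList ['"']).foldl pvStepB (([], []), false)
    pvFlushB st.1.1 st.1.2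

-- ===== PRECONDITION & SPEC =====
def Spec_parse_gmail_labels (labels_header : String) (out : List String) : Prop := out = parse_gmail_labels_alt labels_header
instance (labels_header : String) (out : List String) : Decidable (Spec_parse_gmail_labels labels_header out) := by unfold Spec_parse_gmail_labels; infer_instance

-- ===== CLAIM (what is proved, stated in full; the proofs are below) =====
def Claim_equal_parse_gmail_labels : Prop := ∀ (labels_header : String), Dom_parse_gmail_labels labels_header → Spec_parse_gmail_labels labels_header (parse_gmail_labels labels_header)

-- ===== LEMMAS AND PROOFS =====

-- proof-side recursive model of s.split(q) for a one-character separator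
def pvSplitQ (q : Char) : List Char → List (List Char)
  | [] => [[]]
  | c :: cs =>
    if c = q then [] :: pvSplitQ q cs
    else
      match pvSplitQ q cs with
      | [] => [[c]]
      | p :: ps => (c :: p) :: ps

-- prefix-attach used to characterise splitOn.go's accumulator
def pvConsHead (pre : List Char) : List (List Char) → List (List Char)
  | [] => [pre]
  | p :: ps => (pre ++ p) :: ps

-- join back with the separator (proof-side inverse of pvSplitQ)
def pvJoinQ (q : Char) : List (List Char) → List Char
  | [] => []
  | [p] => p
  | p :: ps => p ++ q :: pvJoinQ q ps

theorem pvSplitQ_ne_nil (q : Char) (cs : List Char) : pvSplitQ q cs ≠ [] := by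
  induction cs with
  | nil => simp [pvSplitQ]
  | cons c cs ih =>
    simp only [pvSplitQ]
    split
    · simp
    · cases h : pvSplitQ q cs <;> simp

theorem pvConsHead_append (a b : List Char) (ps : List (List Char)) :
    pvConsHead (a ++ b) ps = pvConsHead a (pvConsHead b ps) := by
  cases ps <;> simp [pvConsHead]

theorem pvSplitQ_cons_ne (q c : Char) (cs : List Char) (h : c ≠ q) :
    pvSplitQ q (c :: cs) = pvConsHead [c] (pvSplitQ q cs) := by
  simp only [pvSplitQ, if_neg h]
  cases hs : pvSplitQ q cs <;> simp [pvConsHead]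

theorem pvGo_eq (q : Char) (fuel : Nat) (l cur : List Char) (acc : List (List Char))
    (h : l.length < fuel) :
    PySem.Chars.splitOn.go [q] fuel l cur acc = acc.reverse ++ pvConsHead cur.reverse (pvSplitQ q l) := by
  induction fuel generalizing l cur acc with
  | zero => omega
  | succ f ih =>
    cases l with
    | nil => simp [PySem.Chars.splitOn.go, pvSplitQ, pvConsHead]
    | cons c rest =>
      by_cases hc : c = q
      · have hpre : List.isPrefixOf [q] (c :: rest) = true := by simp [List.isPrefixOf, hc]
        simp only [PySem.Chars.splitOn.go, hpre, if_pos]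
        simp only [List.length_cons, List.length_nil, List.drop_succ_cons, List.drop_zero]
        rw [ih rest [] (cur.reverse :: acc) (by simpa using Nat.lt_of_succ_lt_succ h)]
        have hne := pvSplitQ_ne_nil q rest
        cases hs : pvSplitQ q rest with
        | nil => exact absurd hs hne
        | cons p ps =>
          simp [pvSplitQ, hc, hs, pvConsHead]
      · have hpre : List.isPrefixOf [q] (c :: rest) = false := by
          simp [List.isPrefixOf]
          exact fun he => absurd he.symm hc
        simp only [PySem.Chars.splitOn.go, hpre]
        rw [if_neg (by simp)]
        rw [ih rest (c :: cur) acc (by simpa using Nat.lt_of_succ_lt_succ h)]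
        rw [pvSplitQ_cons_ne q c rest hc]
        simp [pvConsHead_append]

theorem pvSplitOn_eq (q : Char) (cs : List Char) :
    PySem.Chars.splitOn cs [q] = pvSplitQ q cs := by
  unfold PySem.Chars.splitOn
  rw [pvGo_eq q (cs.length + 1) cs [] [] (by omega)]
  have hne := pvSplitQ_ne_nil q cs
  cases hs : pvSplitQ q cs with
  | nil => exact absurd hs hne
  | cons p ps => simp [pvConsHead]

theorem pvSplitQ_no_q (q : Char) (cs : List Char) : ∀ p ∈ pvSplitQ q cs, q ∉ p := by
  induction cs with
  | nil => simp [pvSplitQ]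
  | cons c cs ih =>
    simp only [pvSplitQ]
    split
    · intro p hp
      rw [List.mem_cons] at hp
      rcases hp with hp | hp
      · simp [hp]
      · exact ih p hp
    · rename_i hc
      cases hs : pvSplitQ q cs with
      | nil => exact absurd hs (pvSplitQ_ne_nil q cs)
      | cons p ps =>
        intro r hr
        rw [List.mem_cons] at hr
        rcases hr with hr | hr
        · subst hr
          intro hmem
          rw [List.mem_cons] at hmem
          rcases hmem with hmem | hmem
          · exact hc hmem.symm
          · exact ih p (by simp [hs]) hmem
        · exact ih r (by rw [hs]; exact List.mem_cons_of_mem _ hr)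

theorem pvJoinQ_splitQ (q : Char) (cs : List Char) : pvJoinQ q (pvSplitQ q cs) = cs := by
  induction cs with
  | nil => simp [pvSplitQ, pvJoinQ]
  | cons c cs ih =>
    simp only [pvSplitQ]
    split
    · rename_i hc
      subst hc
      cases hs : pvSplitQ c cs with
      | nil => exact absurd hs (pvSplitQ_ne_nil c cs)
      | cons p ps =>
        rw [hs] at ih
        cases ps with
        | nil => simp [pvJoinQ] at ih ⊢; exact ih
        | cons p' ps' => simp [pvJoinQ] at ih ⊢; exact ih
    · cases hs : pvSplitQ q cs with
      | nil => exact absurd hs (pvSplitQ_ne_nil q cs)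
      | cons p ps =>
        rw [hs] at ih
        cases ps with
        | nil => simp [pvJoinQ] at ih ⊢; exact ih
        | cons p' ps' => simp [pvJoinQ] at ih ⊢; exact ih

theorem pvFlushB_eq : pvFlushB = pvFlushA := rfl

-- A's char loop over a quote-free segment with in_quotes = true just appends it
theorem pvL_in (cs : List Char) (h : '"' ∉ cs) (labels : List String) (cur : List Char) :
    cs.foldl pvStepA (labels, cur, true) = (labels, cur ++ cs, true) := by
  induction cs generalizing cur with
  | nil => simp
  | cons c cs ih =>
    have hc : c ≠ '"' := fun he => h (by simp [he])
    have hrest : '"' ∉ cs := fun hm => h (by simp [hm])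
    simp only [List.foldl_cons]
    have hstep : pvStepA (labels, cur, true) c = (labels, cur ++ [c], true) := by
      simp [pvStepA, hc]
    rw [hstep, ih hrest (cur ++ [c])]
    simp

-- A's char loop over a quote-free segment with in_quotes = false = B's outside step
theorem pvL_out (cs : List Char) (h : '"' ∉ cs) (labels : List String) (cur : List Char) :
    cs.foldl pvStepA (labels, cur, false) =
      ((pvOutsideB (labels, cur) cs).1, (pvOutsideB (labels, cur) cs).2, false) := by
  induction cs generalizing labels cur with
  | nil => simp [pvOutsideB, pvSplitOn_eq, pvSplitQ]
  | cons c cs ih =>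
    have hc : c ≠ '"' := fun he => h (by simp [he])
    have hrest : '"' ∉ cs := fun hm => h (by simp [hm])
    by_cases hcm : c = ','
    · subst hcm
      have hstep : pvStepA (labels, cur, false) ',' = (pvFlushA labels cur, [], false) := by
        simp [pvStepA, hc]
      simp only [List.foldl_cons, hstep]
      have hout : pvOutsideB (labels, cur) (',' :: cs) = pvOutsideB (pvFlushA labels cur, []) cs := by
        simp only [pvOutsideB, pvSplitOn_eq, pvSplitQ, if_pos]
        cases hs : pvSplitQ ',' cs with
        | nil => exact absurd hs (pvSplitQ_ne_nil ',' cs)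
        | cons p ps => simp [pvFlushB_eq]
      rw [hout, ih hrest (pvFlushA labels cur) []]
    · have hstep : pvStepA (labels, cur, false) c = (labels, cur ++ [c], false) := by
        simp [pvStepA, hc, hcm]
      simp only [List.foldl_cons, hstep]
      rw [ih hrest labels (cur ++ [c])]
      have : pvOutsideB (labels, cur) (c :: cs) = pvOutsideB (labels, cur ++ [c]) cs := by
        simp only [pvOutsideB, pvSplitOn_eq]
        rw [pvSplitQ_cons_ne ',' c cs hcm]
        cases hs : pvSplitQ ',' cs with
        | nil => exact absurd hs (pvSplitQ_ne_nil ',' cs)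
        | cons p ps => simp [pvConsHead]
      rw [this]

-- one segment of A's loop = one pvStepB, with the flag toggled by the closing quote
theorem pvSeg (p : List Char) (hp : '"' ∉ p) (labels : List String) (cur : List Char) (b : Bool) :
    p.foldl pvStepA (labels, cur, b) =
      ((pvStepB ((labels, cur), b) p).1.1, (pvStepB ((labels, cur), b) p).1.2, b) := by
  cases b with
  | false =>
    rw [pvL_out p hp labels cur]
    simp [pvStepB]
  | true =>
    rw [pvL_in p hp labels cur]
    simp [pvStepB]

-- main generalized lemma: A's char loop over the rejoined segments = B's segment loop
theorem pvG (parts : List (List Char)) (hne : parts ≠ [])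
    (hq : ∀ p ∈ parts, '"' ∉ p) (labels : List String) (cur : List Char) (b : Bool) :
    (pvJoinQ '"' parts).foldl pvStepA (labels, cur, b) =
      ((parts.foldl pvStepB ((labels, cur), b)).1.1,
       (parts.foldl pvStepB ((labels, cur), b)).1.2,
       !(parts.foldl pvStepB ((labels, cur), b)).2) := by
  induction parts generalizing labels cur b with
  | nil => exact absurd rfl hne
  | cons p ps ih =>
    cases ps with
    | nil =>
      simp only [pvJoinQ, List.foldl_cons, List.foldl_nil]
      rw [pvSeg p (hq p (by simp)) labels cur b]
      simp [pvStepB]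
    | cons p' ps' =>
      have hjoin : pvJoinQ '"' (p :: p' :: ps') = p ++ '"' :: pvJoinQ '"' (p' :: ps') := rfl
      rw [hjoin, List.foldl_append]
      rw [pvSeg p (hq p (by simp)) labels cur b]
      simp only [List.foldl_cons]
      have hquote : pvStepA ((pvStepB ((labels, cur), b) p).1.1, (pvStepB ((labels, cur), b) p).1.2, b) '"'
          = ((pvStepB ((labels, cur), b) p).1.1, (pvStepB ((labels, cur), b) p).1.2, !b) := by
        simp [pvStepA]
      rw [hquote]
      have hq' : ∀ r ∈ p' :: ps', '"' ∉ r := fun r hr => hq r (by simp [hr])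
      have := ih (by simp) hq' (pvStepB ((labels, cur), b) p).1.1 (pvStepB ((labels, cur), b) p).1.2 (!b)
      rw [this]
      have hflag : (pvStepB ((labels, cur), b) p).2 = !b := by simp [pvStepB]
      rw [← hflag]
      rfl

-- ===== VERDICT (by name: the statement is the Claim_ definition above) =====
theorem parse_gmail_labels_spec : Claim_equal_parse_gmail_labels := by
  intro s _
  unfold Spec_parse_gmail_labels parse_gmail_labels parse_gmail_labels_alt
  by_cases hnil : s.toList = []
  · simp [hnil]
  · simp only [if_neg hnil]
    rw [pvSplitOn_eq]
    have hjoin : pvJoinQ '"' (pvSplitQ '"' s.toList) = s.toList := pvJoinQ_splitQ '"' s.toList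
    conv_lhs => rw [← hjoin]
    rw [pvG (pvSplitQ '"' s.toList) (pvSplitQ_ne_nil '"' s.toList)
        (pvSplitQ_no_q '"' s.toList) [] [] false]
    rw [pvFlushB_eq]
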